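-- pv_equiv track=rewrite | github.com/SamEthanMathew/PokerAI-Hackathon-2026 | submission/Libratus.py | _bucket_flop_simple
-- ===== SOURCE A (Python) =====
-- from collections import Counter
--
-- NUM_RANKS = 9
--
-- RANK_A = 8
--
-- def _rank(c):
--     return c % NUM_RANKS
--
-- def _suit(c):
--     return c // NUM_RANKS
--
-- def _bucket_flop_simple(community):
--     if len(community) < 3:
--         return "dry"
--     suits = [_suit(c) for c in community]
--     ranks = [_rank(c) for c in community]
--     sc = Counter(suits)
--     rc = Counter(ranks)
--     max_sc = sc.most_common(1)[0][1]
--     is_paired = rc.most_common(1)[0][1] >= 2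
--
--     sorted_r = sorted(set(ranks))
--     conn = 0
--     for i in range(len(sorted_r) - 1):
--         if sorted_r[i + 1] - sorted_r[i] == 1:
--             conn += 1
--     if RANK_A in sorted_r and 0 in sorted_r:
--         conn += 1
--
--     score = 0
--     if max_sc >= 3:
--         score += 3
--     elif max_sc >= 2:
--         score += 1
--     score += conn
--     if is_paired:
--         score += 1
--     if score >= 3:
--         return "wet"
--     if score >= 1:
--         return "medium"
--     return "dry"
-- ===== SOURCE B (Python) =====
-- NUM_RANKS = 9
--
-- RANK_A = 8
--
-- def _rank(c):
--     return c % NUM_RANKS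
--
-- def _suit(c):
--     return c // NUM_RANKS
--
-- def _bucket_flop_simple(community):
--     if len(community) < 3:
--         return "dry"
--     mask = 0
--     for c in community:
--         mask |= 1 << _rank(c)
--     conn = (mask & (mask >> 1)).bit_count()
--     if mask & ((1 << RANK_A) | 1) == ((1 << RANK_A) | 1):
--         conn += 1
--     suits = [_suit(c) for c in community]
--     counts = {}
--     for s in suits:
--         counts[s] = counts.get(s, 0) + 1
--     max_sc = max(counts.values())
--     is_paired = len(community) > mask.bit_count()
--     score = (3 if max_sc >= 3 else 1 if max_sc >= 2 else 0) + conn + (1 if is_paired else 0)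
--     if score >= 3:
--         return "wet"
--     if score >= 1:
--         return "medium"
--     return "dry"
-- ===== Notes on version B (the rewrite author's own statement) =====
-- stated objective: alternative
-- what changed: Replaces the sort-the-distinct-ranks pass and the adjacent-difference index loop by a 9-bit rank bitmask: connectedness is the popcount of mask & (mask >> 1) plus a wheel bit test, pairedness is len(community) > popcount(mask), and the suit max-count is a plain one-pass dict of counts with max(values) instead of Counter.most_common.
import Mathlib
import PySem

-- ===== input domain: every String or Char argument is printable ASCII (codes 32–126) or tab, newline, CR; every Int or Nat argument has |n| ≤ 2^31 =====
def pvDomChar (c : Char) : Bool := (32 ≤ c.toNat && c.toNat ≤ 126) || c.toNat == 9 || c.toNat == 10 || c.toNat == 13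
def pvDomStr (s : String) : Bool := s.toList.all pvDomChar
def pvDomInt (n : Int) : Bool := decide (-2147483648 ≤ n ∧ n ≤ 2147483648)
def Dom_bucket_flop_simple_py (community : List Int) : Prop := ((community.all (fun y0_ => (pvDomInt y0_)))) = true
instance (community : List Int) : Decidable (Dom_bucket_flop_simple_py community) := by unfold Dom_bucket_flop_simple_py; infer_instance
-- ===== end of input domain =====

-- B replaces the sort-distinct-ranks pass and the adjacent-difference index loop by a 9-bit rank
-- bitmask (connectedness = popcount of mask & (mask >> 1) plus a wheel bit test, pairedness =
-- len > popcount(mask)); same return value, similar cost (alternative formulation).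

-- ===== PORT A =====
def bucket_flop_simple_py (community : List Int) : String :=
  if community.length < 3 then "dry"
  else
    let suits := community.map (fun c => PySem.Int.floordiv c 9)
    let ranks := community.map (fun c => PySem.Int.mod c 9)
    let sc := PySem.Dict.counter suits
    let rc := PySem.Dict.counter ranks
    -- most_common(1)[0][1] is the largest count; values nonempty here since len(community) ≥ 3
    let max_sc : Int := (PySem.List.max? sc.values (fun v => v)).getD 0
    let is_paired : Bool := decide ((PySem.List.max? rc.values (fun v => v)).getD 0 ≥ 2)
    let sorted_r := PySem.List.sorted (PySem.Set.ofList ranks) (fun x => x) false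
    let conn : Int := (PySem.List.pyRange 0 ((sorted_r.length : Int) - 1) 1).foldl
        (fun conn i =>
          if PySem.List.pyGetD sorted_r (i + 1) 0 - PySem.List.pyGetD sorted_r i 0 = 1 then conn + 1
          else conn) 0
    let conn : Int := if (8 : Int) ∈ sorted_r ∧ (0 : Int) ∈ sorted_r then conn + 1 else conn
    let score : Int := if max_sc ≥ 3 then 3 else if max_sc ≥ 2 then 1 else 0
    let score := score + conn
    let score := if is_paired then score + 1 else score
    if score ≥ 3 then "wet" else if score ≥ 1 then "medium" else "dry"

-- ===== PORT B =====
def bucket_flop_simple_py_alt (community : List Int) : String :=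
  if community.length < 3 then "dry"
  else
    let mask : Int := community.foldl
        (fun m c => PySem.Int.bor m ((1 : Int) <<< (PySem.Int.mod c 9).toNat)) 0
    let conn : Int := (PySem.Int.bitCount (PySem.Int.band mask (mask >>> 1)) : Int)
    let conn : Int := if PySem.Int.band mask 257 = 257 then conn + 1 else conn
    let suits := community.map (fun c => PySem.Int.floordiv c 9)
    let counts := suits.foldl (fun d s => d.insert s (d.getD s 0 + (1 : Int))) PySem.Dict.empty
    let max_sc : Int := (PySem.List.max? counts.values (fun v => v)).getD 0
    let is_paired : Bool := decide (community.length > PySem.Int.bitCount mask)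
    let score : Int :=
      (if max_sc ≥ 3 then 3 else if max_sc ≥ 2 then 1 else 0) + conn
        + (if is_paired then 1 else 0)
    if score ≥ 3 then "wet" else if score ≥ 1 then "medium" else "dry"

-- ===== PRECONDITION & SPEC =====
def Spec_bucket_flop_simple_py (community : List Int) (out : String) : Prop := out = bucket_flop_simple_py_alt community
instance (community : List Int) (out : String) : Decidable (Spec_bucket_flop_simple_py community out) := by unfold Spec_bucket_flop_simple_py; infer_instance

-- ===== CLAIM (what is proved, stated in full; the proofs are below) =====
def Claim_equal_bucket_flop_simple_py : Prop := ∀ (community : List Int), Dom_bucket_flop_simple_py community → Spec_bucket_flop_simple_py community (bucket_flop_simple_py community)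

-- ===== LEMMAS AND PROOFS =====

theorem pvShift (k : Nat) : (1 : Int) <<< k = ((1 <<< k : Nat) : Int) := by
  simp [Int.shiftLeft_eq, Nat.shiftLeft_eq]

theorem pvMaskCast (L : List Int) : ∀ n : Nat,
    L.foldl (fun m c => PySem.Int.bor m ((1 : Int) <<< (PySem.Int.mod c 9).toNat)) (n : Int)
      = ((L.foldl (fun m c => m ||| (1 <<< (PySem.Int.mod c 9).toNat)) n : Nat) : Int) := by
  induction L with
  | nil => intro n; simp
  | cons c t ih =>
      intro n
      simp only [List.foldl_cons, pvShift, PySem.Int.bor_natCast]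
      exact ih _

theorem pvMaskBit (L : List Int) : ∀ (n j : Nat),
    (L.foldl (fun m c => m ||| (1 <<< (PySem.Int.mod c 9).toNat)) n).testBit j
      ↔ n.testBit j ∨ ∃ c ∈ L, (PySem.Int.mod c 9).toNat = j := by
  induction L with
  | nil => simp
  | cons c t ih =>
      intro n j
      simp only [List.foldl_cons]
      rw [ih]
      simp [Nat.testBit_or, Nat.one_shiftLeft, Nat.testBit_two_pow, or_assoc]

theorem pvMaskLt (L : List Int) : ∀ n : Nat, n < 512 →
    (L.foldl (fun m c => m ||| (1 <<< (PySem.Int.mod c 9).toNat)) n) < 512 := by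
  induction L with
  | nil => exact fun n h => h
  | cons c t ih =>
      intro n hn
      apply ih
      have hk : (PySem.Int.mod c 9).toNat < 9 := by
        have h1 := PySem.Int.mod_lt c (b := 9) (by norm_num)
        have h2 := PySem.Int.mod_nonneg c (b := 9) (by norm_num)
        omega
      have h2p : (1 <<< (PySem.Int.mod c 9).toNat) < 512 := by
        rw [Nat.one_shiftLeft]
        calc 2 ^ (PySem.Int.mod c 9).toNat < 2 ^ 9 := Nat.pow_lt_pow_right (by norm_num) hk
          _ = 512 := by norm_num
      exact Nat.or_lt_two_pow (n := 9) hn h2p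

theorem pvCounterValues (xs : List Int) :
    (PySem.Dict.counter xs).values = (PySem.Set.ofList xs).map (fun k => (xs.count k : Int)) := by
  simp [PySem.Dict.values, PySem.Dict.items_counter, List.map_map, Function.comp]

theorem pvSorted (ranks : List Int) (hb : ∀ r ∈ ranks, 0 ≤ r ∧ r < 9) :
    PySem.List.sorted (PySem.Set.ofList ranks) (fun x => x) false
      = (PySem.List.pyRange 0 9 1).filter (fun x => decide (x ∈ ranks)) := by
  apply PySem.List.sorted_eq_of_perm_of_pairwise_lt
  · rw [List.perm_ext_iff_of_nodup ((PySem.List.nodup_pyRange_one 0 9).filter _)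
      (PySem.Set.nodup_ofList ranks)]
    intro a
    simp only [List.mem_filter, PySem.List.mem_pyRange_one, PySem.Set.mem_ofList,
      decide_eq_true_eq]
    exact ⟨fun h => h.2, fun h => ⟨hb a h, h⟩⟩
  · exact (PySem.List.pairwise_lt_pyRange_one 0 9).filter _

theorem pvFilterCongr (ranks : List Int) (m : Nat)
    (h : ∀ j : Nat, j < 9 → (m.testBit j ↔ ((j : Int) ∈ ranks))) :
    (PySem.List.pyRange 0 9 1).filter (fun x => decide (x ∈ ranks))
      = (PySem.List.pyRange 0 9 1).filter (fun x => m.testBit x.toNat) := by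
  apply List.filter_congr
  intro x hx
  rw [PySem.List.mem_pyRange_one] at hx
  have hx9 : x.toNat < 9 := by omega
  have hxx : (x.toNat : Int) = x := by omega
  have hiff := h x.toNat hx9
  rw [hxx] at hiff
  by_cases hmem : x ∈ ranks
  · simp [hmem, hiff.mpr hmem]
  · simp only [hmem, decide_false]
    cases hbit : m.testBit x.toNat with
    | false => rfl
    | true => exact absurd (hiff.mp hbit) hmem

theorem pvNodupLen (ranks : List Int) :
    (¬ ranks.Nodup) ↔ (PySem.Set.ofList ranks).length < ranks.length := by
  have hperm : (PySem.Set.ofList ranks).Perm ranks.dedup := by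
    rw [List.perm_ext_iff_of_nodup (PySem.Set.nodup_ofList ranks) ranks.nodup_dedup]
    intro a; rw [PySem.Set.mem_ofList, List.mem_dedup]
  rw [hperm.length_eq]
  have hsub := ranks.dedup_sublist
  have hle := hsub.length_le
  constructor
  · intro hnd
    rcases Nat.lt_or_ge ranks.dedup.length ranks.length with h | h
    · exact h
    · exact absurd (List.dedup_eq_self.mp (hsub.eq_of_length (by omega)))
        (by simpa [List.dedup_eq_self] using hnd)
  · intro hlt hnd
    rw [List.dedup_eq_self.mpr hnd] at hlt
    omega

theorem pvPaired (ranks : List Int) (hne : ranks ≠ []) :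
    ((2 : Int) ≤ (PySem.List.max?
        ((PySem.Set.ofList ranks).map (fun k => (ranks.count k : Int))) (fun v => v)).getD 0
      ↔ (PySem.Set.ofList ranks).length < ranks.length) := by
  rw [← pvNodupLen]
  have hsne : PySem.Set.ofList ranks ≠ [] := by
    intro h
    rcases List.exists_mem_of_ne_nil ranks hne with ⟨x, hx⟩
    have := (PySem.Set.mem_ofList _ _).mpr hx
    simp [h] at this
  have hvne : (PySem.Set.ofList ranks).map (fun k => (ranks.count k : Int)) ≠ [] := by
    simp [List.map_eq_nil_iff, hsne]
  obtain ⟨v, hv⟩ : ∃ v, PySem.List.max?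
      ((PySem.Set.ofList ranks).map (fun k => (ranks.count k : Int))) (fun v => v) = some v := by
    cases hm : PySem.List.max?
        ((PySem.Set.ofList ranks).map (fun k => (ranks.count k : Int))) (fun v => v) with
    | none => exact absurd ((PySem.List.max?_eq_none_iff _ _).mp hm) hvne
    | some v => exact ⟨v, rfl⟩
  rw [hv]
  simp only [Option.getD_some]
  constructor
  · intro h2
    have hvm := PySem.List.max?_mem hv
    rcases List.mem_map.mp hvm with ⟨k, _, hk⟩
    rw [List.nodup_iff_count_le_one]
    push Not
    exact ⟨k, by omega⟩
  · intro hnd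
    rw [List.nodup_iff_count_le_one] at hnd
    push Not at hnd
    rcases hnd with ⟨a, ha⟩
    have hmem : a ∈ ranks := by
      by_contra hc
      rw [List.count_eq_zero_of_not_mem hc] at ha
      omega
    have hmm : ((ranks.count a : Int)) ∈
        (PySem.Set.ofList ranks).map (fun k => (ranks.count k : Int)) :=
      List.mem_map.mpr ⟨a, (PySem.Set.mem_ofList _ _).mpr hmem, rfl⟩
    have hle := PySem.List.max?_isMax hv _ hmm
    simp at hle
    omega

set_option maxHeartbeats 4000000 in
set_option maxRecDepth 100000 in
theorem pvKeyFin : ∀ m : Fin 512,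
    ((if (8 : Int) ∈ (PySem.List.pyRange 0 9 1).filter (fun x => Nat.testBit m.val x.toNat)
          ∧ (0 : Int) ∈ (PySem.List.pyRange 0 9 1).filter (fun x => Nat.testBit m.val x.toNat) then
        (PySem.List.pyRange 0
            ((((PySem.List.pyRange 0 9 1).filter (fun x => Nat.testBit m.val x.toNat)).length : Int)
              - 1) 1).foldl
          (fun conn i =>
            if PySem.List.pyGetD ((PySem.List.pyRange 0 9 1).filter
                  (fun x => Nat.testBit m.val x.toNat)) (i + 1) 0
                - PySem.List.pyGetD ((PySem.List.pyRange 0 9 1).filter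
                  (fun x => Nat.testBit m.val x.toNat)) i 0 = 1 then conn + 1
            else conn) (0 : Int) + 1
      else
        (PySem.List.pyRange 0
            ((((PySem.List.pyRange 0 9 1).filter (fun x => Nat.testBit m.val x.toNat)).length : Int)
              - 1) 1).foldl
          (fun conn i =>
            if PySem.List.pyGetD ((PySem.List.pyRange 0 9 1).filter
                  (fun x => Nat.testBit m.val x.toNat)) (i + 1) 0
                - PySem.List.pyGetD ((PySem.List.pyRange 0 9 1).filter
                  (fun x => Nat.testBit m.val x.toNat)) i 0 = 1 then conn + 1
            else conn) (0 : Int))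
      = (if PySem.Int.band (m.val : Int) 257 = 257 then
          (PySem.Int.bitCount (PySem.Int.band (m.val : Int) ((m.val : Int) >>> 1)) : Int) + 1
        else
          (PySem.Int.bitCount (PySem.Int.band (m.val : Int) ((m.val : Int) >>> 1)) : Int)))
    ∧ (PySem.Int.bitCount (m.val : Int)
        = ((PySem.List.pyRange 0 9 1).filter (fun x => Nat.testBit m.val x.toNat)).length) := by
  decide

theorem pvKey (m : Nat) (hm : m < 512) :
    ((if (8 : Int) ∈ (PySem.List.pyRange 0 9 1).filter (fun x => Nat.testBit m x.toNat)
          ∧ (0 : Int) ∈ (PySem.List.pyRange 0 9 1).filter (fun x => Nat.testBit m x.toNat) then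
        (PySem.List.pyRange 0
            ((((PySem.List.pyRange 0 9 1).filter (fun x => Nat.testBit m x.toNat)).length : Int)
              - 1) 1).foldl
          (fun conn i =>
            if PySem.List.pyGetD ((PySem.List.pyRange 0 9 1).filter
                  (fun x => Nat.testBit m x.toNat)) (i + 1) 0
                - PySem.List.pyGetD ((PySem.List.pyRange 0 9 1).filter
                  (fun x => Nat.testBit m x.toNat)) i 0 = 1 then conn + 1
            else conn) (0 : Int) + 1
      else
        (PySem.List.pyRange 0
            ((((PySem.List.pyRange 0 9 1).filter (fun x => Nat.testBit m x.toNat)).length : Int)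
              - 1) 1).foldl
          (fun conn i =>
            if PySem.List.pyGetD ((PySem.List.pyRange 0 9 1).filter
                  (fun x => Nat.testBit m x.toNat)) (i + 1) 0
                - PySem.List.pyGetD ((PySem.List.pyRange 0 9 1).filter
                  (fun x => Nat.testBit m x.toNat)) i 0 = 1 then conn + 1
            else conn) (0 : Int))
      = (if PySem.Int.band (m : Int) 257 = 257 then
          (PySem.Int.bitCount (PySem.Int.band (m : Int) ((m : Int) >>> 1)) : Int) + 1
        else
          (PySem.Int.bitCount (PySem.Int.band (m : Int) ((m : Int) >>> 1)) : Int)))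
    ∧ (PySem.Int.bitCount (m : Int)
        = ((PySem.List.pyRange 0 9 1).filter (fun x => Nat.testBit m x.toNat)).length) :=
  pvKeyFin ⟨m, hm⟩

theorem pvCascade (ms cA cB : Int) (pA pB : Bool) (hc : cA = cB) (hp : pA = pB) :
    (if (if pA then (ms + cA) + 1 else ms + cA) ≥ 3 then "wet"
     else if (if pA then (ms + cA) + 1 else ms + cA) ≥ 1 then "medium" else "dry")
    = (if (ms + cB + (if pB then 1 else 0)) ≥ 3 then "wet"
       else if (ms + cB + (if pB then 1 else 0)) ≥ 1 then "medium" else "dry") := by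
  subst hc hp
  cases pA <;> simp

-- ===== VERDICT (by name: the statement is the Claim_ definition above) =====
theorem bucket_flop_simple_py_spec : Claim_equal_bucket_flop_simple_py := by
  intro community _
  unfold Spec_bucket_flop_simple_py bucket_flop_simple_py bucket_flop_simple_py_alt
  by_cases hlen : community.length < 3
  · simp [hlen]
  · simp only [if_neg hlen]
    set ranks := community.map (fun c => PySem.Int.mod c 9) with hranks
    set suits := community.map (fun c => PySem.Int.floordiv c 9) with hsuits
    have hb : ∀ r ∈ ranks, 0 ≤ r ∧ r < 9 := by
      intro r hr
      rcases List.mem_map.mp hr with ⟨c, _, rfl⟩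
      exact ⟨PySem.Int.mod_nonneg c (by norm_num), PySem.Int.mod_lt c (by norm_num)⟩
    have hcne : community ≠ [] := by
      intro h
      rw [h] at hlen
      simp at hlen
    have hrne : ranks ≠ [] := by
      rw [hranks]
      simpa [List.map_eq_nil_iff] using hcne
    have hmc : community.foldl
        (fun m c => PySem.Int.bor m ((1 : Int) <<< (PySem.Int.mod c 9).toNat)) 0
        = ((community.foldl (fun m c => m ||| (1 <<< (PySem.Int.mod c 9).toNat)) 0 : Nat) : Int) := by
      simpa using pvMaskCast community 0
    set mN := community.foldl (fun m c => m ||| (1 <<< (PySem.Int.mod c 9).toNat)) 0 with hmN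
    have hmlt : mN < 512 := pvMaskLt community 0 (by norm_num)
    have hbit : ∀ j : Nat, j < 9 → (mN.testBit j ↔ ((j : Int) ∈ ranks)) := by
      intro j hj
      rw [hmN, pvMaskBit]
      simp only [Nat.zero_testBit, Bool.false_eq_true, false_or, hranks, List.mem_map]
      constructor
      · rintro ⟨c, hc, hcj⟩
        refine ⟨c, hc, ?_⟩
        have := PySem.Int.mod_nonneg c (b := 9) (by norm_num)
        omega
      · rintro ⟨c, hc, hcj⟩
        refine ⟨c, hc, ?_⟩
        omega
    have hl : PySem.List.sorted (PySem.Set.ofList ranks) (fun x => x) false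
        = (PySem.List.pyRange 0 9 1).filter (fun x => Nat.testBit mN x.toNat) :=
      (pvSorted ranks hb).trans (pvFilterCongr ranks mN hbit)
    have hkey := pvKey mN hmlt
    rw [PySem.Dict.foldl_insert_getD_add_one_eq_counter, pvCounterValues ranks, hl, hmc]
    apply pvCascade
    · exact hkey.1
    · rw [decide_eq_decide]
      have h2 : ((PySem.List.pyRange 0 9 1).filter (fun x => Nat.testBit mN x.toNat)).length
          = (PySem.Set.ofList ranks).length := by
        rw [← hl]
        exact (PySem.List.sorted_perm (PySem.Set.ofList ranks) (fun x : Int => x) false).length_eq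
      have h3 : community.length = ranks.length := by simp [hranks]
      rw [ge_iff_le, pvPaired ranks hrne]
      rw [hkey.2, h2, h3]
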